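-- pv_equiv track=rewrite | github.com/idaxon/Password-breach-checker | password_popularity_checker/password_checker_with_model.py | provide_recommendations
-- ===== SOURCE A (Python) =====
-- def provide_recommendations(password):
--     """Provide password improvement recommendations."""
--     recommendations = []
--     if len(password) < 8:
--         recommendations.append("Increase length to at least 8 characters.")
--     if not any(char.isdigit() for char in password):
--         recommendations.append("Add at least one numeric character.")
--     if not any(char.isupper() for char in password):
--         recommendations.append("Include uppercase letters.")
--     if not any(not char.isalnum() for char in password):
--         recommendations.append("Add special characters like !, @, #, etc.")
--
--     return recommendations if recommendations else ["Your password is strong!"]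
-- ===== SOURCE B (Python) =====
-- RULES = [
--     (8, "Increase length to at least 8 characters."),
--     (1, "Add at least one numeric character."),
--     (2, "Include uppercase letters."),
--     (4, "Add special characters like !, @, #, etc."),
-- ]
--
--
-- def _char_mask(ch):
--     """Bitmask of requirement bits this single character satisfies."""
--     return (1 if ch.isdigit() else 0) | (2 if ch.isupper() else 0) | (0 if ch.isalnum() else 4)
--
--
-- def provide_recommendations(password):
--     """Provide password improvement recommendations (bitmask + rules table)."""
--     mask = 8 if len(password) >= 8 else 0
--     for ch in password:
--         mask |= _char_mask(ch)
--     recs = [msg for bit, msg in RULES if not mask & bit]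
--     return recs if recs else ["Your password is strong!"]
-- ===== Notes on version B (the rewrite author's own statement) =====
-- stated objective: alternative
-- what changed: B encodes all four requirements (length included) as bits of one integer mask accumulated in a single fold over the password, then emits messages data-driven from a RULES table of (bit, message) pairs for every unset bit, instead of A's four independent checks each appending a hard-coded string.
import Mathlib
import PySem

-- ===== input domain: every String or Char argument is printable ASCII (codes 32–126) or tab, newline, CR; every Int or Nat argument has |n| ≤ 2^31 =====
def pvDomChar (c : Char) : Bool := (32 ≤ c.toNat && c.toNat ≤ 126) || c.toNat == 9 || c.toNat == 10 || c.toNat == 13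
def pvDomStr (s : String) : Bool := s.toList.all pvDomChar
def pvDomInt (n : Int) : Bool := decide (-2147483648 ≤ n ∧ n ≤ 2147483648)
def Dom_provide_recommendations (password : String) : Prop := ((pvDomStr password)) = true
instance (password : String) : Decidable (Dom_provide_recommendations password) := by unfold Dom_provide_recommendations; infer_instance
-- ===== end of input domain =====

-- B replaces A's four independent checks with one bitmask fold plus a data-driven rules table; same output, alternative structure (no speed claim).


-- ===== PORT A =====
def provide_recommendations (password : String) : List String :=
  let recommendations : List String := []
  let recommendations := if PySem.Str.len password < 8 then
      recommendations ++ ["Increase length to at least 8 characters."] else recommendations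
  let recommendations := if ¬ (password.toList.any PySem.Chars.isdigit) then
      recommendations ++ ["Add at least one numeric character."] else recommendations
  let recommendations := if ¬ (password.toList.any PySem.Chars.isupper) then
      recommendations ++ ["Include uppercase letters."] else recommendations
  let recommendations := if ¬ (password.toList.any (fun c => !PySem.Chars.isalnum c)) then
      recommendations ++ ["Add special characters like !, @, #, etc."] else recommendations
  if recommendations ≠ [] then recommendations else ["Your password is strong!"]

-- ===== PORT B =====
-- the RULES table: (requirement bit, message to emit when the bit is unset)
def pvRules : List (Nat × String) :=
  [(8, "Increase length to at least 8 characters."),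
   (1, "Add at least one numeric character."),
   (2, "Include uppercase letters."),
   (4, "Add special characters like !, @, #, etc.")]

-- _char_mask: bitmask of requirement bits one character satisfies
def pvCharMask (c : Char) : Nat :=
  (if PySem.Chars.isdigit c then 1 else 0) |||
  (if PySem.Chars.isupper c then 2 else 0) |||
  (if PySem.Chars.isalnum c then 0 else 4)

def provide_recommendations_alt (password : String) : List String :=
  let mask0 : Nat := if 8 ≤ PySem.Str.len password then 8 else 0
  let mask := password.toList.foldl (fun m c => m ||| pvCharMask c) mask0
  let recs := pvRules.filterMap (fun r => if mask &&& r.1 = 0 then some r.2 else none)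
  if recs ≠ [] then recs else ["Your password is strong!"]

-- ===== PRECONDITION & SPEC =====
def Spec_provide_recommendations (password : String) (out : List String) : Prop := out = provide_recommendations_alt password
instance (password : String) (out : List String) : Decidable (Spec_provide_recommendations password out) := by unfold Spec_provide_recommendations; infer_instance

-- ===== CLAIM (what is proved, stated in full; the proofs are below) =====
def Claim_equal_provide_recommendations : Prop := ∀ (password : String), Dom_provide_recommendations password → Spec_provide_recommendations password (provide_recommendations password)

-- ===== LEMMAS AND PROOFS =====
-- the combined mask of a whole list of characters
def pvMaskOf (l : List Char) : Nat :=
  (if l.any PySem.Chars.isdigit then 1 else 0) |||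
  (if l.any PySem.Chars.isupper then 2 else 0) |||
  (if l.any (fun c => !PySem.Chars.isalnum c) then 4 else 0)

theorem pvFoldl_mask (l : List Char) (m : Nat) :
    l.foldl (fun m c => m ||| pvCharMask c) m = m ||| pvMaskOf l := by
  induction l generalizing m with
  | nil => simp [pvMaskOf]
  | cons x xs ih =>
    simp only [List.foldl_cons, ih, Nat.or_assoc]
    congr 1
    show pvCharMask x ||| pvMaskOf xs = pvMaskOf (x :: xs)
    simp only [pvCharMask, pvMaskOf, List.any_cons]
    by_cases hdx : PySem.Chars.isdigit x = true <;>
      by_cases hux : PySem.Chars.isupper x = true <;>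
      by_cases hax : PySem.Chars.isalnum x = true <;>
      by_cases hd : xs.any PySem.Chars.isdigit = true <;>
      by_cases hu : xs.any PySem.Chars.isupper = true <;>
      by_cases hs : (xs.any fun c => !PySem.Chars.isalnum c) = true <;>
      simp only [Bool.not_eq_true] at hdx hux hax hd hu hs ⊢ <;>
      simp only [hdx, hux, hax, hd, hu, hs] <;> decide

-- ===== VERDICT (by name: the statement is the Claim_ definition above) =====
theorem provide_recommendations_spec : Claim_equal_provide_recommendations := by
  intro password _
  show _ = _
  simp only [provide_recommendations, provide_recommendations_alt, pvFoldl_mask]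
  by_cases hl : password.length < 8
  · have hl2 : ¬ 8 ≤ password.length := by omega
    rcases hd : password.toList.any PySem.Chars.isdigit <;>
      rcases hu : password.toList.any PySem.Chars.isupper <;>
      rcases hs : password.toList.any (fun c => !PySem.Chars.isalnum c) <;>
      simp [pvMaskOf, pvRules, hd, hu, hs, hl, hl2]
  · have hl2 : 8 ≤ password.length := by omega
    rcases hd : password.toList.any PySem.Chars.isdigit <;>
      rcases hu : password.toList.any PySem.Chars.isupper <;>
      rcases hs : password.toList.any (fun c => !PySem.Chars.isalnum c) <;>
      simp [pvMaskOf, pvRules, hd, hu, hs, hl, hl2]
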